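-- pv_equiv track=rewrite | github.com/welsol21/weather_forecast | src/weather_patterns/pattern/segmentation.py | _union_boundaries
-- ===== SOURCE A (Python) =====
-- def _union_boundaries(
--     channel_boundaries: dict[str, list[int]],
--     n: int,
-- ) -> tuple[list[int], dict[int, int]]:
--     """Union all channel boundaries.  Also compute synchrony count per boundary.
--
--     Returns:
--         union_boundaries: sorted list of boundary indices
--         synchrony: dict[boundary_index → count of channels with boundary here]
--     """
--     from collections import Counter
--     counts: Counter[int] = Counter()
--     for blist in channel_boundaries.values():
--         counts.update(blist)
--
--     union = sorted(counts.keys())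
--     # Ensure 0 and n are present
--     if not union or union[0] != 0:
--         union = [0] + union
--     if union[-1] != n:
--         union.append(n)
--
--     synchrony = {b: counts.get(b, 0) for b in union}
--     return union, synchrony
-- ===== SOURCE B (Python) =====
-- def _union_boundaries(
--     channel_boundaries: dict[str, list[int]],
--     n: int,
-- ) -> tuple[list[int], dict[int, int]]:
--     """Sort-then-group re-implementation: flatten all boundaries, sort once,
--     then one pass over the sorted list builds both the unique boundary list
--     and the run-length (synchrony) counts."""
--     flat = [b for blist in channel_boundaries.values() for b in blist]
--     flat.sort()
--     uniq: list[int] = []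
--     runs: dict[int, int] = {}
--     i = 0
--     m = len(flat)
--     while i < m:
--         j = i
--         while j < m and flat[j] == flat[i]:
--             j += 1
--         uniq.append(flat[i])
--         runs[flat[i]] = j - i
--         i = j
--     union = uniq if uniq and uniq[0] == 0 else [0] + uniq
--     if union[-1] != n:
--         union.append(n)
--     synchrony = {b: runs.get(b, 0) for b in union}
--     return union, synchrony
-- ===== Notes on version B (the rewrite author's own statement) =====
-- stated objective: alternative
-- what changed: Replaces the Counter-hash-then-sort-keys strategy by flattening all channel boundary lists, sorting once, and a single grouping pass over the sorted list that yields both the unique boundaries and the run-length synchrony counts.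
import Mathlib
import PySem

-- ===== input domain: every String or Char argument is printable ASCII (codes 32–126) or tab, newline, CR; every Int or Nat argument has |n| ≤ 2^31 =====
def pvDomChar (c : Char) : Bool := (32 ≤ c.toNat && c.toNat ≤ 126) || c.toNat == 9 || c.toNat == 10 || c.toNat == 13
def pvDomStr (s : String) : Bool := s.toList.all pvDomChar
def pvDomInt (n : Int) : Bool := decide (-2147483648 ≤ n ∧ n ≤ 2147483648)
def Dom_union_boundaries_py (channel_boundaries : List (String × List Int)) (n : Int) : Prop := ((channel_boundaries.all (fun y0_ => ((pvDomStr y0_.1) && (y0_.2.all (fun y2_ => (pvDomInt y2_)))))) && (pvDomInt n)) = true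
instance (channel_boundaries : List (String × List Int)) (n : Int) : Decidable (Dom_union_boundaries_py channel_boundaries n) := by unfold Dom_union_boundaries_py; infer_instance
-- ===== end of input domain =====

-- B unions channel boundaries by flatten + one sort + a single grouping pass (run lengths)
-- instead of A's Counter-then-sort-keys; alternative decomposition, same return value.

-- ===== PORT A =====
def union_boundaries_py (channel_boundaries : List (String × List Int)) (n : Int) : List Int × (List (Int × Int)) :=
  let counts : PySem.Dict Int Int :=
    channel_boundaries.foldl (fun d p => p.2.foldl (fun d x => d.modify x 0 (· + 1)) d) PySem.Dict.empty
  let union0 := PySem.List.sorted counts.keys (fun x => x) false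
  let union1 := if union0 = [] ∨ union0.head? ≠ some 0 then 0 :: union0 else union0
  let union := if union1.getLast? ≠ some n then union1 ++ [n] else union1
  let synchrony := (union.foldl (fun d b => d.insert b (counts.getD b 0)) PySem.Dict.empty).items
  (union, synchrony)

-- ===== PORT B =====
-- the grouping pass of Source B: the inner while-loop scanning a run is takeWhile, the jump i := j is dropWhile
def groupRuns : List Int → List (Int × Int)
  | [] => []
  | x :: xs =>
      (x, ((xs.takeWhile (· == x)).length : Int) + 1) :: groupRuns (xs.dropWhile (· == x))
termination_by l => l.length
decreasing_by simp; exact List.length_dropWhile_le _ _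

def union_boundaries_py_alt (channel_boundaries : List (String × List Int)) (n : Int) : List Int × (List (Int × Int)) :=
  let flat := (channel_boundaries.map (·.2)).flatten
  let s := PySem.List.sorted flat (fun x => x) false
  let runs := groupRuns s
  let uniq := runs.map (·.1)
  let union1 := if uniq ≠ [] ∧ uniq.head? = some 0 then uniq else 0 :: uniq
  let union := if union1.getLast? ≠ some n then union1 ++ [n] else union1
  let synchrony := (union.foldl (fun d b => d.insert b ((runs.lookup b).getD 0)) PySem.Dict.empty).items
  (union, synchrony)

-- ===== PRECONDITION & SPEC =====
def Spec_union_boundaries_py (channel_boundaries : List (String × List Int)) (n : Int) (out : List Int × (List (Int × Int))) : Prop := out = union_boundaries_py_alt channel_boundaries n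
instance (channel_boundaries : List (String × List Int)) (n : Int) (out : List Int × (List (Int × Int))) : Decidable (Spec_union_boundaries_py channel_boundaries n out) := by unfold Spec_union_boundaries_py; infer_instance

-- ===== CLAIM (what is proved, stated in full; the proofs are below) =====
def Claim_equal_union_boundaries_py : Prop := ∀ (channel_boundaries : List (String × List Int)) (n : Int), Dom_union_boundaries_py channel_boundaries n → Spec_union_boundaries_py channel_boundaries n (union_boundaries_py channel_boundaries n)

-- ===== LEMMAS AND PROOFS =====

-- A's nested Counter-update fold builds Counter of the flattened boundary lists
lemma countsA_eq (cb : List (String × List Int)) :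
    cb.foldl (fun d p => p.2.foldl (fun d x => d.modify x 0 (· + 1)) d) PySem.Dict.empty
      = PySem.Dict.counter ((cb.map (·.2)).flatten) := by
  rw [PySem.Dict.counter_eq_foldl, List.foldl_flatten, List.foldl_map]

-- the heads of groupRuns are exactly the elements of the list
lemma mem_groupRuns_fst (l : List Int) (b : Int) :
    b ∈ (groupRuns l).map (·.1) ↔ b ∈ l := by
  induction l using groupRuns.induct with
  | case1 => simp [groupRuns]
  | case2 x xs ih =>
      have hsplit : xs.takeWhile (· == x) ++ xs.dropWhile (· == x) = xs :=
        List.takeWhile_append_dropWhile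
      simp only [groupRuns, List.map_cons, List.mem_cons, ih]
      constructor
      · rintro (rfl | h)
        · exact Or.inl rfl
        · exact Or.inr ((List.dropWhile_sublist _).mem h)
      · rintro (rfl | h)
        · exact Or.inl rfl
        · rcases List.mem_append.mp (hsplit ▸ h) with h1 | h2
          · left
            have := List.mem_takeWhile_imp h1
            simpa using this
          · exact Or.inr h2

-- on a sorted list, the head's value does not reappear after dropWhile
lemma not_mem_dropWhile_sorted (x : Int) (xs : List Int)
    (h : (x :: xs).Pairwise (· ≤ ·)) : x ∉ xs.dropWhile (· == x) := by
  induction xs with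
  | nil => simp
  | cons a t ih =>
      by_cases ha : a = x
      · subst ha
        rw [List.dropWhile_cons_of_pos (by simp)]
        exact ih (h.sublist (by simp))
      · rw [List.dropWhile_cons_of_neg (by simpa using ha)]
        have hax : x ≤ a := (List.pairwise_cons.mp h).1 a (by simp)
        have hat : ∀ y ∈ t, a ≤ y :=
          (List.pairwise_cons.mp ((List.pairwise_cons.mp h).2)).1
        intro hmem
        rcases List.mem_cons.mp hmem with rfl | hmt
        · exact ha rfl
        · have := hat x hmt
          omega

-- heads of groupRuns on a sorted list are strictly increasing
lemma groupRuns_fst_pairwise (l : List Int) (h : l.Pairwise (· ≤ ·)) :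
    ((groupRuns l).map (·.1)).Pairwise (· < ·) := by
  induction l using groupRuns.induct with
  | case1 => simp [groupRuns]
  | case2 x xs ih =>
      have hrest : (xs.dropWhile (· == x)).Pairwise (· ≤ ·) :=
        h.sublist ((List.dropWhile_sublist _).cons _)
      simp only [groupRuns, List.map_cons, List.pairwise_cons]
      refine ⟨?_, ih hrest⟩
      intro y hy
      have hym : y ∈ xs.dropWhile (· == x) := (mem_groupRuns_fst _ _).mp hy
      have hyxs : y ∈ xs := (List.dropWhile_sublist _).mem hym
      have hle : x ≤ y := (List.pairwise_cons.mp h).1 y hyxs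
      have hne : y ≠ x := by
        intro rfl'; subst rfl'
        exact not_mem_dropWhile_sorted y xs h hym
      omega

-- run lengths recorded by groupRuns are occurrence counts, on a sorted list
lemma groupRuns_lookup (l : List Int) (h : l.Pairwise (· ≤ ·)) (b : Int) :
    ((groupRuns l).lookup b).getD 0 = (l.count b : Int) := by
  induction l using groupRuns.induct with
  | case1 => simp [groupRuns]
  | case2 x xs ih =>
      have hsplit : xs.takeWhile (· == x) ++ xs.dropWhile (· == x) = xs :=
        List.takeWhile_append_dropWhile
      have hrest : (xs.dropWhile (· == x)).Pairwise (· ≤ ·) :=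
        h.sublist ((List.dropWhile_sublist _).cons _)
      have hxs : xs.count b
          = (xs.takeWhile (· == x)).count b + (xs.dropWhile (· == x)).count b := by
        conv_lhs => rw [← hsplit]
        rw [List.count_append]
      by_cases hb : b = x
      · subst hb
        have hcount_take : (xs.takeWhile (· == b)).count b = (xs.takeWhile (· == b)).length := by
          rw [List.count_eq_length]
          intro y hy
          have := List.mem_takeWhile_imp hy
          exact (by simpa using this : y = b).symm
        have hcount_drop : (xs.dropWhile (· == b)).count b = 0 :=
          List.count_eq_zero.mpr (not_mem_dropWhile_sorted b xs h)
        rw [groupRuns]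
        simp only [List.lookup, BEq.rfl, Option.getD_some, List.count_cons, hxs,
          hcount_take, hcount_drop]
        push_cast
        ring
      · have hcount_take : (xs.takeWhile (· == x)).count b = 0 := by
          rw [List.count_eq_zero]
          intro hy
          have := List.mem_takeWhile_imp hy
          exact hb (by simpa using this)
        rw [groupRuns]
        simp only [List.lookup, show (b == x) = false by simpa using hb]
        rw [ih hrest, List.count_cons, hxs, hcount_take]
        simp [Ne.symm hb]

lemma ports_agree (cb : List (String × List Int)) (n : Int) :
    union_boundaries_py cb n = union_boundaries_py_alt cb n := by
  have hs_pair : (PySem.List.sorted ((cb.map (·.2)).flatten) (fun x => x) false).Pairwise (· ≤ ·) := by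
    simpa using PySem.List.sorted_pairwise ((cb.map (·.2)).flatten) (fun x => x)
  set flat := (cb.map (·.2)).flatten with hflat
  set s := PySem.List.sorted flat (fun x => x) false with hs
  set uniq := (groupRuns s).map (·.1) with huq
  have huniq : PySem.List.sorted (PySem.Dict.counter flat).keys (fun x => x) false = uniq := by
    rw [PySem.Dict.keys_counter]
    apply PySem.List.sorted_eq_of_perm_of_pairwise_lt
    · apply (List.perm_ext_iff_of_nodup ?_ ?_).mpr
      · intro b
        rw [huq, mem_groupRuns_fst, hs, PySem.List.mem_sorted, PySem.Set.mem_ofList]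
      · exact (groupRuns_fst_pairwise s hs_pair).imp (fun h => ne_of_lt h)
      · exact PySem.Set.nodup_ofList flat
    · simpa using groupRuns_fst_pairwise s hs_pair
  have hcount : ∀ b : Int, (PySem.Dict.counter flat).getD b 0 = ((groupRuns s).lookup b).getD 0 := by
    intro b
    rw [PySem.Dict.getD_counter, groupRuns_lookup s hs_pair b,
      (PySem.List.sorted_perm flat (fun x => x) false).count_eq]
  have hunion1 : (if uniq = [] ∨ uniq.head? ≠ some 0 then 0 :: uniq else uniq)
      = (if uniq ≠ [] ∧ uniq.head? = some 0 then uniq else 0 :: uniq) := by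
    by_cases hcond : uniq = [] ∨ uniq.head? ≠ some 0
    · rw [if_pos hcond, if_neg (by tauto)]
    · rw [if_neg hcond, if_pos (by tauto)]
  simp only [union_boundaries_py, union_boundaries_py_alt, countsA_eq, ← hflat, ← hs, ← huq,
    huniq, hcount, hunion1]

-- ===== VERDICT (by name: the statement is the Claim_ definition above) =====
theorem union_boundaries_py_spec : Claim_equal_union_boundaries_py := by
  intro cb n _
  unfold Spec_union_boundaries_py
  exact ports_agree cb n
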